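-- pv_equiv track=rewrite | github.com/s-koide-dc/Design2Code | src/code_synthesis/statement_builder.py | get_normalized_method_name
-- ===== SOURCE A (Python) =====
-- def get_normalized_method_name(name: str) -> str:
--     parts = []
--     current = []
--     for ch in str(name):
--         if ch.isalnum():
--             current.append(ch)
--         else:
--             if current:
--                 parts.append("".join(current))
--                 current = []
--     if current:
--         parts.append("".join(current))
--     normalized = ""
--     for p in parts:
--         if not p: continue
--         if p.isupper(): normalized += p.capitalize()
--         else: normalized += p[0].upper() + p[1:]
--     return normalized
-- ===== SOURCE B (Python) =====
-- def get_normalized_method_name(name: str) -> str: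
--     s = str(name)
--     n = len(s)
--     out = []
--     i = 0
--     while i < n:
--         if not s[i].isalnum():
--             i += 1
--             continue
--         # two-pointer scan: find the token end, computing case flags on the way
--         j = i
--         has_alpha = False
--         has_lower = False
--         while j < n and s[j].isalnum():
--             if s[j].isalpha():
--                 has_alpha = True
--                 if s[j].islower():
--                     has_lower = True
--             j += 1
--         lower_rest = has_alpha and not has_lower  # token.isupper()
--         out.append(s[i].upper())
--         for k in range(i + 1, j):
--             out.append(s[k].lower() if lower_rest else s[k])
--         i = j
--     return "".join(out)
-- ===== Notes on version B (the rewrite author's own statement) =====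
-- stated objective: alternative
-- what changed: B replaces A's tokenize-then-capitalize pipeline (build a list of token strings, then apply isupper/capitalize/slicing to each) by a single two-pointer index scan that computes the has_alpha/has_lower case flags while locating each token's end and emits the transformed characters one by one, never materializing a token list or calling substring methods.
import Mathlib
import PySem

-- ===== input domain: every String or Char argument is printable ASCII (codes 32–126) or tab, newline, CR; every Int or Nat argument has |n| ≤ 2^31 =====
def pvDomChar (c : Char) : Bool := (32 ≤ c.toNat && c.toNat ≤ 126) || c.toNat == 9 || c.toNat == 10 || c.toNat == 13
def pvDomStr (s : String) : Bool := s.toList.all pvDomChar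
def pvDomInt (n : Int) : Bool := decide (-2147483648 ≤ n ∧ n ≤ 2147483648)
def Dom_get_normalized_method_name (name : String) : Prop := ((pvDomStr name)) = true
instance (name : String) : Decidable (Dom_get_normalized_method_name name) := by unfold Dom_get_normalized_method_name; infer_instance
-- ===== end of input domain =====

-- B replaces A's tokenize-then-capitalize pipeline by one two-pointer scan that computes the
-- case flags while locating each token end and emits transformed characters directly
-- (objective: alternative).

-- Shared ports of Python string built-ins not in PySem; exact on the ASCII domain,
-- where the cased characters are exactly a-z/A-Z.
-- s.isupper(): at least one cased character and no lowercase one.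
def pyStrIsupper (cs : List Char) : Bool :=
  cs.any PySem.Chars.isalpha && !cs.any PySem.Chars.islower
-- s.capitalize(): first character uppercased, the rest lowercased.
def pyCapitalize : List Char → List Char
  | [] => []
  | c :: t => PySem.Chars.upperChar c :: t.map PySem.Chars.lowerChar

-- ===== PORT A =====
-- A's tokenizer loop: state (parts, current), flushing current into parts on non-alnum.
def tokA : List Char → List Char → List (List Char) → List (List Char)
  | [], cur, parts => if cur.isEmpty then parts else parts ++ [cur]
  | c :: t, cur, parts =>
    if PySem.Chars.isalnum c then tokA t (cur ++ [c]) parts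
    else if cur.isEmpty then tokA t [] parts
    else tokA t [] (parts ++ [cur])

def get_normalized_method_name (name : String) : String :=
  String.ofList ((tokA name.toList [] []).foldl (fun acc p =>
    if p.isEmpty then acc
    else acc ++ (if pyStrIsupper p then pyCapitalize p
                 else match p with
                      | [] => []  -- unreachable: guarded by the isEmpty test above
                      | c :: t => PySem.Chars.upperChar c :: t)) [])

-- ===== PORT B =====
-- B's inner while loop: scan to the token end, returning
-- (token chars after the start, has_alpha, has_lower, rest of the string).
def tokScan : List Char → (List Char × Bool × Bool × List Char)
  | [] => ([], false, false, [])
  | c :: t =>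
    if PySem.Chars.isalnum c then
      let r := tokScan t
      (c :: r.1,
       r.2.1 || PySem.Chars.isalpha c,
       r.2.2.1 || (PySem.Chars.isalpha c && PySem.Chars.islower c),
       r.2.2.2)
    else ([], false, false, c :: t)

theorem tokScan_rest_le (cs : List Char) : (tokScan cs).2.2.2.length ≤ cs.length := by
  induction cs with
  | nil => simp [tokScan]
  | cons c t ih =>
    by_cases h : PySem.Chars.isalnum c = true <;> simp [tokScan, h]
    omega

-- B's outer while loop over the remaining characters.
def emitB : List Char → List Char
  | [] => []
  | c :: t =>
    if PySem.Chars.isalnum c then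
      let r := tokScan t
      PySem.Chars.upperChar c ::
        ((if (r.2.1 || PySem.Chars.isalpha c) &&
             !(r.2.2.1 || (PySem.Chars.isalpha c && PySem.Chars.islower c)) then
            r.1.map PySem.Chars.lowerChar else r.1) ++ emitB r.2.2.2)
    else emitB t
termination_by cs => cs.length
decreasing_by
  · simp only [List.length_cons]; exact Nat.lt_succ_of_le (tokScan_rest_le t)
  · simp

def get_normalized_method_name_alt (name : String) : String :=
  String.ofList (emitB name.toList)

-- ===== PRECONDITION & SPEC =====
def Spec_get_normalized_method_name (name : String) (out : String) : Prop := out = get_normalized_method_name_alt name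
instance (name : String) (out : String) : Decidable (Spec_get_normalized_method_name name out) := by unfold Spec_get_normalized_method_name; infer_instance

-- ===== CLAIM (what is proved, stated in full; the proofs are below) =====
def Claim_equal_get_normalized_method_name : Prop := ∀ (name : String), Dom_get_normalized_method_name name → Spec_get_normalized_method_name name (get_normalized_method_name name)

-- ===== LEMMAS AND PROOFS =====

-- A's tokenizer with the parts accumulator factored out.
def toksC : List Char → List Char → List (List Char)
  | cur, [] => if cur = [] then [] else [cur]
  | cur, c :: t =>
    if PySem.Chars.isalnum c then toksC (cur ++ [c]) t
    else if cur = [] then toksC [] t else cur :: toksC [] t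

-- the capitalization rule applied to one token
def capTok (p : List Char) : List Char :=
  if pyStrIsupper p then pyCapitalize p
  else match p with
       | [] => []
       | c :: t => PySem.Chars.upperChar c :: t

lemma tokA_eq_toksC (cs cur : List Char) (parts : List (List Char)) :
    tokA cs cur parts = parts ++ toksC cur cs := by
  induction cs generalizing cur parts with
  | nil => by_cases h : cur = [] <;> simp [tokA, toksC, h, List.isEmpty_iff]
  | cons c t ih =>
    by_cases h : PySem.Chars.isalnum c = true
    · simp [tokA, toksC, h, ih]
    · by_cases hc : cur = [] <;> simp [tokA, toksC, h, hc, List.isEmpty_iff, ih]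

lemma toksC_ne_nil (cs cur : List Char) : ∀ p ∈ toksC cur cs, p ≠ [] := by
  induction cs generalizing cur with
  | nil =>
    intro p hp
    by_cases h : cur = [] <;> simp [toksC, h] at hp
    subst hp; assumption
  | cons c t ih =>
    intro p hp
    by_cases h : PySem.Chars.isalnum c = true
    · simp [toksC, h] at hp; exact ih (cur ++ [c]) p hp
    · by_cases hc : cur = []
      · simp [toksC, h, hc] at hp; exact ih [] p hp
      · simp [toksC, h, hc] at hp
        rcases hp with h1 | h1
        · subst h1; exact hc
        · exact ih [] p h1

lemma cap_fold_eq_flatten (parts : List (List Char)) (acc : List Char)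
    (hp : ∀ p ∈ parts, p ≠ []) :
    parts.foldl (fun acc p =>
      if p.isEmpty then acc
      else acc ++ (if pyStrIsupper p then pyCapitalize p
                   else match p with
                        | [] => []
                        | c :: t => PySem.Chars.upperChar c :: t)) acc
    = acc ++ (parts.map capTok).flatten := by
  induction parts generalizing acc with
  | nil => simp
  | cons p t ih =>
    have hpe : p.isEmpty = false := by simpa using hp p List.mem_cons_self
    rw [List.foldl_cons, List.map_cons, List.flatten_cons]
    rw [ih _ (fun q hq => hp q (List.mem_cons_of_mem _ hq))]
    simp [hpe, capTok, List.append_assoc]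

-- pending-buffer tokenization in terms of the token scan
lemma toksC_cons (cs cur : List Char) (hc : cur ≠ []) :
    toksC cur cs = (cur ++ (tokScan cs).1) :: toksC [] (tokScan cs).2.2.2 := by
  induction cs generalizing cur with
  | nil => simp [toksC, tokScan, hc]
  | cons c t ih =>
    by_cases h : PySem.Chars.isalnum c = true
    · have := ih (cur ++ [c]) (by simp)
      simp only [toksC, tokScan, h, if_true] at *
      simpa using this
    · simp [toksC, tokScan, h, hc]

lemma islower_imp_isalpha {c : Char} (h : PySem.Chars.islower c = true) :
    PySem.Chars.isalpha c = true := by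
  have ha : ('a').toNat = 97 := rfl
  have hz : ('z').toNat = 122 := rfl
  have key : ∀ a b : Char, (a ≤ b) ↔ a.toNat ≤ b.toNat := fun _ _ => Iff.rfl
  simp only [PySem.Chars.islower, Bool.and_eq_true, decide_eq_true_eq, key, ha, hz] at h
  simp only [PySem.Chars.isalpha, PySem.Chars.isupper, PySem.Chars.islower,
    Bool.or_eq_true, Bool.and_eq_true, decide_eq_true_eq, key, ha, hz]
  omega

lemma alpha_and_lower (c : Char) :
    (PySem.Chars.isalpha c && PySem.Chars.islower c) = PySem.Chars.islower c := by
  by_cases h : PySem.Chars.islower c = true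
  · simp [h, islower_imp_isalpha h]
  · simp [Bool.not_eq_true] at h; simp [h]

-- the flags returned by tokScan characterize isupper of the scanned token
lemma tokScan_flags (cs : List Char) :
    (tokScan cs).2.1 = (tokScan cs).1.any PySem.Chars.isalpha ∧
    (tokScan cs).2.2.1 = (tokScan cs).1.any PySem.Chars.islower := by
  induction cs with
  | nil => simp [tokScan]
  | cons c t ih =>
    by_cases h : PySem.Chars.isalnum c = true
    · simp [tokScan, h, ih.1, ih.2, alpha_and_lower, Bool.or_comm]
    · simp [tokScan, h]

-- main lemma: B's emitter renders A's token list
lemma emitB_eq_render (cs : List Char) :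
    emitB cs = ((toksC [] cs).map capTok).flatten := by
  induction hn : cs.length using Nat.strong_induction_on generalizing cs with
  | _ n ih =>
  cases cs with
  | nil => simp [emitB, toksC]
  | cons c t =>
    by_cases h : PySem.Chars.isalnum c = true
    · have hflags := tokScan_flags t
      have hrest : (tokScan t).2.2.2.length ≤ t.length := tokScan_rest_le t
      have htok : toksC [] (c :: t) = (c :: (tokScan t).1) :: toksC [] (tokScan t).2.2.2 := by
        have h1 : toksC [] (c :: t) = toksC [c] t := by simp [toksC, h]
        rw [h1, toksC_cons t [c] (by simp)]
        rfl
      have hihr : emitB (tokScan t).2.2.2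
          = ((toksC [] (tokScan t).2.2.2).map capTok).flatten := by
        subst hn
        exact ih _ (by simpa using Nat.lt_succ_of_le hrest) _ rfl
      have hcomm : ∀ a b c' d : Bool, ((a || b) && !(c' || d)) = ((b || a) && !(d || c')) := by
        decide
      have hcap : capTok (c :: (tokScan t).1) =
          PySem.Chars.upperChar c ::
            (if ((tokScan t).2.1 || PySem.Chars.isalpha c) &&
                !((tokScan t).2.2.1 || (PySem.Chars.isalpha c && PySem.Chars.islower c)) then
              (tokScan t).1.map PySem.Chars.lowerChar else (tokScan t).1) := by
        simp only [capTok, pyStrIsupper, pyCapitalize, List.any_cons,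
          hflags.1, hflags.2, alpha_and_lower, hcomm]
        split <;> rfl
      simp only [emitB, h, if_true, htok, List.map_cons, List.flatten_cons, hihr, hcap, List.cons_append]
    · have h1 : toksC [] (c :: t) = toksC [] t := by simp [toksC, h]
      have h2 : emitB (c :: t) = emitB t := by simp [emitB, h]
      rw [h1, h2]
      subst hn
      exact ih t.length (by simp) t rfl

-- ===== VERDICT (by name: the statement is the Claim_ definition above) =====
theorem get_normalized_method_name_spec : Claim_equal_get_normalized_method_name := by
  intro name _
  unfold Spec_get_normalized_method_name get_normalized_method_name get_normalized_method_name_alt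
  rw [tokA_eq_toksC, List.nil_append,
    cap_fold_eq_flatten _ _ (toksC_ne_nil _ _), List.nil_append, emitB_eq_render]
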